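-- pv_equiv track=rewrite | github.com/raphlev/WTPyScripts | windchill/generate_enum_def_view_with_new_entries.py | normalize_xml
-- ===== SOURCE A (Python) =====
-- def normalize_xml(xml_content):
--     replacements = [
--             ('</csvBeginEnumDefView>', ''),
--             ('</csvBeginEnumMemberView>', ''),
--             ('<csvEndEnumMemberView handler="com.ptc.core.lwc.server.TypeDefinitionLoader.endProcessEnumMembership"/>', '</csvBeginEnumMemberView>'),
--             ('<csvEndEnumMemberView handler="com.ptc.core.lwc.server.BaseDefinitionLoader.endProcessEnumMembership"/>', '</csvBeginEnumMemberView>'),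
--             ('<csvEndEnumDefView handler="com.ptc.core.lwc.server.TypeDefinitionLoader.endProcessEnumerationDefinition"/>', '</csvBeginEnumDefView>'),
--             ('<csvEndEnumDefView handler="com.ptc.core.lwc.server.BaseDefinitionLoader.endProcessEnumerationDefinition"/>', '</csvBeginEnumDefView>'),
--     ]
--     for old, new in replacements:
--         xml_content = xml_content.replace(old, new)
--     return xml_content
-- ===== SOURCE B (Python) =====
-- def _rk_replace(s, old, new):
--     # Rabin-Karp: locate occurrences of `old` with a rolling hash over a sliding
--     # window (verified on hash hit), splicing `new` between the untouched gaps.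
--     m = len(old)
--     n = len(s)
--     if m > n:
--         return s
--     B = 1114112
--     hp = 0
--     for c in old:
--         hp = hp * B + ord(c)
--     shift = B ** (m - 1)
--     h = 0
--     for c in s[:m]:
--         h = h * B + ord(c)
--     out = []
--     last = 0
--     i = 0
--     while i + m <= n:
--         if h == hp and s[i:i + m] == old:
--             out.append(s[last:i])
--             out.append(new)
--             i += m
--             last = i
--             if i + m <= n:
--                 h = 0
--                 for c in s[i:i + m]:
--                     h = h * B + ord(c)
--         else:
--             if i + m < n:
--                 h = (h - ord(s[i]) * shift) * B + ord(s[i + m])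
--             i += 1
--     out.append(s[last:])
--     return ''.join(out)
--
--
-- def normalize_xml(xml_content):
--     replacements = [
--             ('</csvBeginEnumDefView>', ''),
--             ('</csvBeginEnumMemberView>', ''),
--             ('<csvEndEnumMemberView handler="com.ptc.core.lwc.server.TypeDefinitionLoader.endProcessEnumMembership"/>', '</csvBeginEnumMemberView>'),
--             ('<csvEndEnumMemberView handler="com.ptc.core.lwc.server.BaseDefinitionLoader.endProcessEnumMembership"/>', '</csvBeginEnumMemberView>'),
--             ('<csvEndEnumDefView handler="com.ptc.core.lwc.server.TypeDefinitionLoader.endProcessEnumerationDefinition"/>', '</csvBeginEnumDefView>'),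
--             ('<csvEndEnumDefView handler="com.ptc.core.lwc.server.BaseDefinitionLoader.endProcessEnumerationDefinition"/>', '</csvBeginEnumDefView>'),
--     ]
--     for old, new in replacements:
--         xml_content = _rk_replace(xml_content, old, new)
--     return xml_content
-- ===== Notes on version B (the rewrite author's own statement) =====
-- stated objective: alternative
-- what changed: Each pass now finds pattern occurrences with a Rabin-Karp scan (rolling polynomial hash over a sliding window, candidate verified on hash hit) and splices the output from the untouched gaps, instead of delegating the scan-and-substitute to str.replace.
import Mathlib
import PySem

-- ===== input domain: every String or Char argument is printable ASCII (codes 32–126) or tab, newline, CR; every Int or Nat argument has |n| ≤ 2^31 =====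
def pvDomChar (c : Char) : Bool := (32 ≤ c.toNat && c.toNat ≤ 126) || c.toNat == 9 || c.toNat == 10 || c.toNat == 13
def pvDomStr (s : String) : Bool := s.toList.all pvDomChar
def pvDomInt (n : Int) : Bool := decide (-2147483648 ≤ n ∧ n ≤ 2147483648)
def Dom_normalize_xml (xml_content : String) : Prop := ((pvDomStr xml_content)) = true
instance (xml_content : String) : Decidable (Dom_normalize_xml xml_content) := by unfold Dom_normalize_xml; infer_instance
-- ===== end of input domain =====

-- B replaces each str.replace pass by a Rabin–Karp scan: a rolling hash over a sliding
-- window locates candidate occurrences (verified on hash hit) and the output is spliced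
-- from the untouched gaps; same return value ("alternative" objective, no speed claim).

-- ===== PORT A =====
-- A's loop 'for old, new in replacements: xml_content = xml_content.replace(old, new)'
-- as a foldl over the same literal table, each step PySem.Str.replace (= str.replace).
def normalize_xml (xml_content : String) : String :=
  List.foldl (fun s p => PySem.Str.replace s p.1 p.2) xml_content
    [("</csvBeginEnumDefView>", ""),
     ("</csvBeginEnumMemberView>", ""),
     ("<csvEndEnumMemberView handler=\"com.ptc.core.lwc.server.TypeDefinitionLoader.endProcessEnumMembership\"/>", "</csvBeginEnumMemberView>"),
     ("<csvEndEnumMemberView handler=\"com.ptc.core.lwc.server.BaseDefinitionLoader.endProcessEnumMembership\"/>", "</csvBeginEnumMemberView>"),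
     ("<csvEndEnumDefView handler=\"com.ptc.core.lwc.server.TypeDefinitionLoader.endProcessEnumerationDefinition\"/>", "</csvBeginEnumDefView>"),
     ("<csvEndEnumDefView handler=\"com.ptc.core.lwc.server.BaseDefinitionLoader.endProcessEnumerationDefinition\"/>", "</csvBeginEnumDefView>")]

-- ===== PORT B =====
-- Source B's 'hp = hp * B + ord(c)' folds (B = 1114112); pvHash a l is that fold from a.
def pvHash (a : Int) (l : List Char) : Int :=
  List.foldl (fun h c => h * 1114112 + (c.toNat : Int)) a l

-- Source B's while loop, step for step: state (i, last, h, out); the fuel argument only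
-- makes the recursion structural (it starts at n + 1 > number of iterations).
-- s[i:i+m] is List.take m (List.drop i L) (indices in range), ord(s[j]) is L.getD j.
def rkGo (L old new : List Char) (hp shift : Int) (m n : Nat) :
    Nat → Nat → Nat → Int → List (List Char) → List (List Char)
  | 0, _, last, _, out => out ++ [L.drop last]
  | fuel + 1, i, last, h, out =>
    if i + m ≤ n then
      if h = hp ∧ List.take m (L.drop i) = old then
        rkGo L old new hp shift m n fuel (i + m) (i + m)
          (if (i + m) + m ≤ n then pvHash 0 (List.take m (L.drop (i + m))) else h)
          (out ++ [List.take (i - last) (L.drop last), new])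
      else
        rkGo L old new hp shift m n fuel (i + 1) last
          (if i + m < n then
              (h - ((L.getD i 'a').toNat : Int) * shift) * 1114112 + ((L.getD (i + m) 'a').toNat : Int)
            else h)
          out
    else out ++ [L.drop last]

-- Source B's _rk_replace: early return when the pattern is longer than the text, pattern
-- hash, shift = B**(m-1), hash of the first window, then the scan; ''.join = flatten.
def rkReplace (s old new : List Char) : List Char :=
  if old.length > s.length then s
  else
    (rkGo s old new (pvHash 0 old) ((1114112 : Int) ^ (old.length - 1)) old.length s.length
      (s.length + 1) 0 0 (pvHash 0 (s.take old.length)) []).flatten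

-- Source B's outer loop over the same table, each step _rk_replace.
def normalize_xml_alt (xml_content : String) : String :=
  List.foldl (fun s p => String.ofList (rkReplace s.toList p.1.toList p.2.toList)) xml_content
    [("</csvBeginEnumDefView>", ""),
     ("</csvBeginEnumMemberView>", ""),
     ("<csvEndEnumMemberView handler=\"com.ptc.core.lwc.server.TypeDefinitionLoader.endProcessEnumMembership\"/>", "</csvBeginEnumMemberView>"),
     ("<csvEndEnumMemberView handler=\"com.ptc.core.lwc.server.BaseDefinitionLoader.endProcessEnumMembership\"/>", "</csvBeginEnumMemberView>"),
     ("<csvEndEnumDefView handler=\"com.ptc.core.lwc.server.TypeDefinitionLoader.endProcessEnumerationDefinition\"/>", "</csvBeginEnumDefView>"),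
     ("<csvEndEnumDefView handler=\"com.ptc.core.lwc.server.BaseDefinitionLoader.endProcessEnumerationDefinition\"/>", "</csvBeginEnumDefView>")]

-- ===== PRECONDITION & SPEC =====
def Spec_normalize_xml (xml_content : String) (out : String) : Prop := out = normalize_xml_alt xml_content
instance (xml_content : String) (out : String) : Decidable (Spec_normalize_xml xml_content out) := by unfold Spec_normalize_xml; infer_instance

-- ===== CLAIM (what is proved, stated in full; the proofs are below) =====
def Claim_equal_normalize_xml : Prop := ∀ (xml_content : String), Dom_normalize_xml xml_content → Spec_normalize_xml xml_content (normalize_xml xml_content)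

-- ===== LEMMAS AND PROOFS =====

-- hash of a fold started at a, split off the start value.
theorem pvHash_shift (l : List Char) : ∀ a : Int,
    pvHash a l = a * 1114112 ^ l.length + pvHash 0 l := by
  induction l with
  | nil => intro a; simp [pvHash]
  | cons c t ih =>
    intro a
    simp only [pvHash, List.foldl_cons, List.length_cons] at *
    rw [ih (a * 1114112 + (c.toNat : Int)), ih ((0 : Int) * 1114112 + (c.toNat : Int))]
    ring

theorem pvHash_cons (c : Char) (t : List Char) :
    pvHash 0 (c :: t) = (c.toNat : Int) * 1114112 ^ t.length + pvHash 0 t := by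
  have := pvHash_shift t ((0 : Int) * 1114112 + (c.toNat : Int))
  simp only [pvHash, List.foldl_cons] at *
  rw [this]; ring

theorem pvHash_snoc (t : List Char) (c : Char) :
    pvHash 0 (t ++ [c]) = pvHash 0 t * 1114112 + (c.toNat : Int) := by
  simp [pvHash, List.foldl_append]

-- isPrefixOf as a take-equation (length in range).
theorem isPrefixOf_eq_take (old l : List Char) (h : old.length ≤ l.length) :
    old.isPrefixOf l = (List.take old.length l == old) := by
  cases hb : old.isPrefixOf l
  · symm
    rw [beq_eq_false_iff_ne]
    intro he
    have hpre : old <+: l := by rw [← he]; exact List.take_prefix _ _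
    have := List.isPrefixOf_iff_prefix.mpr hpre
    rw [hb] at this
    exact Bool.false_ne_true this
  · symm
    rw [beq_iff_eq]
    exact (List.prefix_iff_eq_take.mp (List.isPrefixOf_iff_prefix.mp hb)).symm

theorem isPrefixOf_false_of_short (old l : List Char) (h : l.length < old.length) :
    old.isPrefixOf l = false := by
  cases hb : old.isPrefixOf l
  · rfl
  · have := (List.isPrefixOf_iff_prefix.mp hb).length_le
    omega

-- replace.go's accumulator can be pulled out.
theorem replace_go_acc (old new : List Char) :
    ∀ (fuel : Nat) (l acc : List Char),
      PySem.Chars.replace.go old new fuel l acc = acc.reverse ++ PySem.Chars.replace.go old new fuel l [] := by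
  intro fuel
  induction fuel with
  | zero => intro l acc; simp [PySem.Chars.replace.go]
  | succ f ih =>
    intro l acc
    cases l with
    | nil => simp [PySem.Chars.replace.go]
    | cons c t =>
      rw [PySem.Chars.replace.go, PySem.Chars.replace.go]
      by_cases hp : old.isPrefixOf (c :: t) = true
      · simp only [hp, if_true]
        rw [ih _ (new.reverse ++ acc), ih _ (new.reverse ++ [])]
        simp
      · simp only [hp]
        rw [ih _ (c :: acc), ih _ (c :: [])]
        simp

-- replace.go is fuel-irrelevant above the list length.
theorem replace_go_fuel (old new : List Char) (hold : old ≠ []) :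
    ∀ (N fuel₁ fuel₂ : Nat) (l acc : List Char),
      l.length ≤ N → l.length ≤ fuel₁ → l.length ≤ fuel₂ →
      PySem.Chars.replace.go old new fuel₁ l acc = PySem.Chars.replace.go old new fuel₂ l acc := by
  intro N
  induction N with
  | zero =>
    intro fuel₁ fuel₂ l acc hn h1 h2
    have : l = [] := List.length_eq_zero_iff.mp (Nat.le_zero.mp hn)
    subst this
    cases fuel₁ <;> cases fuel₂ <;> simp [PySem.Chars.replace.go]
  | succ N ih =>
    intro fuel₁ fuel₂ l acc hn h1 h2
    cases l with
    | nil => cases fuel₁ <;> cases fuel₂ <;> simp [PySem.Chars.replace.go]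
    | cons c t =>
      simp only [List.length_cons] at hn h1 h2
      obtain ⟨f1, rfl⟩ : ∃ f, fuel₁ = f + 1 := ⟨fuel₁ - 1, by omega⟩
      obtain ⟨f2, rfl⟩ : ∃ f, fuel₂ = f + 1 := ⟨fuel₂ - 1, by omega⟩
      rw [PySem.Chars.replace.go, PySem.Chars.replace.go]
      by_cases hp : old.isPrefixOf (c :: t) = true
      · simp only [hp, if_true]
        apply ih
        · have : 1 ≤ old.length := by cases old <;> simp_all
          simp [List.length_drop]; omega
        · have : 1 ≤ old.length := by cases old <;> simp_all
          simp [List.length_drop]; omega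
        · have : 1 ≤ old.length := by cases old <;> simp_all
          simp [List.length_drop]; omega
      · simp only [hp]
        apply ih <;> omega

-- replace.go on a remainder shorter than the pattern copies it unchanged.
theorem replace_go_short (old new : List Char) :
    ∀ (l : List Char) (fuel : Nat) (acc : List Char),
      l.length < old.length → l.length ≤ fuel →
      PySem.Chars.replace.go old new fuel l acc = acc.reverse ++ l := by
  intro l
  induction l with
  | nil => intro fuel acc _ _; cases fuel <;> simp [PySem.Chars.replace.go]
  | cons c t ih =>
    intro fuel acc hl hf
    simp only [List.length_cons] at hl hf
    obtain ⟨f, rfl⟩ : ∃ f, fuel = f + 1 := ⟨fuel - 1, by omega⟩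
    rw [PySem.Chars.replace.go]
    rw [isPrefixOf_false_of_short old (c :: t) (by simpa using hl)]
    simp only [Bool.false_eq_true, if_false]
    rw [ih f (c :: acc) (by omega) (by omega)]
    simp

-- MAIN INVARIANT: the Rabin–Karp scan, from any mid-state, produces the pending
-- pieces followed by replace.go on the rest of the text.
theorem rkGo_eq_replace_go (L old new : List Char) (m n : Nat)
    (hm : m = old.length) (hm1 : 1 ≤ m) (hn : n = L.length) :
    ∀ (fuel : Nat) (i last : Nat) (h : Int) (out : List (List Char)),
      n - i < fuel → last ≤ i → i ≤ n →
      (i + m ≤ n → h = pvHash 0 (List.take m (L.drop i))) →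
      (rkGo L old new (pvHash 0 old) ((1114112 : Int) ^ (m - 1)) m n fuel i last h out).flatten
        = out.flatten ++ List.take (i - last) (L.drop last)
            ++ PySem.Chars.replace.go old new (L.drop i).length (L.drop i) [] := by
  intro fuel
  have hold : old ≠ [] := by cases old <;> simp_all
  induction fuel with
  | zero => intro i last h out hf _ _ _; omega
  | succ fuel ih =>
    intro i last h out hf hlast hi hh
    rw [rkGo]
    by_cases hin : i + m ≤ n
    · have hwin := hh hin
      have hdroplen : (L.drop i).length = n - i := by simp [hn]
      have hiltn : i < n := by omega
      have hmlen : old.length ≤ (L.drop i).length := by omega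
      by_cases hmatch : List.take m (L.drop i) = old
      · -- the window equals the pattern: both sides emit `new` and jump m
        rw [if_pos hin, if_pos ⟨hmatch ▸ hwin, hmatch⟩,
            ih (i + m) (i + m) _ _ (by omega) (le_refl _) hin (fun hc => by rw [if_pos hc])]
        obtain ⟨c, t, hct⟩ : ∃ c t, L.drop i = c :: t := by
          rcases hLi : L.drop i with _ | ⟨c, t⟩
          · exfalso
            rw [hLi] at hdroplen
            simp at hdroplen
            omega
          · exact ⟨c, t, rfl⟩
        have htlen : t.length = n - i - 1 := by
          have := hdroplen
          rw [hct] at this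
          simp at this
          omega
        have hdlen2 : (L.drop (i + m)).length = n - (i + m) := by simp [hn]
        have hpre : old.isPrefixOf (c :: t) = true := by
          rw [← hct, isPrefixOf_eq_take old _ hmlen, beq_iff_eq, ← hm, hmatch]
        have hdd : List.drop old.length (c :: t) = L.drop (i + m) := by
          rw [← hct, List.drop_drop]
          congr 1
          omega
        have hstep : PySem.Chars.replace.go old new (L.drop i).length (L.drop i) []
            = new ++ PySem.Chars.replace.go old new (L.drop (i + m)).length (L.drop (i + m)) [] := by
          conv_lhs => rw [hct]
          simp only [List.length_cons]
          rw [PySem.Chars.replace.go, if_pos hpre, hdd,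
              replace_go_acc old new t.length (L.drop (i + m)) (new.reverse ++ []),
              replace_go_fuel old new hold t.length t.length (L.drop (i + m)).length
                (L.drop (i + m)) [] (by omega) (by omega) (le_refl _)]
          simp
        rw [hstep]
        simp [List.append_assoc]
      · -- no match: both sides advance one character
        have hguard : ¬ (h = pvHash 0 old ∧ List.take m (L.drop i) = old) := fun hc => hmatch hc.2
        rw [if_pos hin, if_neg hguard]
        have hiL : i < L.length := by omega
        have hcons : L.drop i = L[i] :: L.drop (i + 1) := List.drop_eq_getElem_cons hiL
        have hdlen1 : (L.drop (i + 1)).length = n - (i + 1) := by simp [hn]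
        -- rolling-hash invariant for the next window
        have hhash : (i + 1) + m ≤ n →
            (if i + m < n then
                (h - ((L.getD i 'a').toNat : Int) * (1114112 : Int) ^ (m - 1)) * 1114112
                  + ((L.getD (i + m) 'a').toNat : Int)
              else h)
              = pvHash 0 (List.take m (L.drop (i + 1))) := by
          intro hc
          have hlt : i + m < n := by omega
          have himL : i + m < L.length := by omega
          rw [if_pos hlt]
          obtain ⟨m', rfl⟩ : ∃ m', m = m' + 1 := ⟨m - 1, by omega⟩
          have hw : List.take (m' + 1) (L.drop i) = L[i] :: List.take m' (L.drop (i + 1)) := by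
            rw [hcons, List.take_succ_cons]
          have hwlen : (List.take m' (L.drop (i + 1))).length = m' := by
            simp
            omega
          have hw2 : List.take (m' + 1) (L.drop (i + 1))
              = List.take m' (L.drop (i + 1)) ++ [L[i + m' + 1]] := by
            rw [List.take_add_one]
            congr 1
            rw [List.getElem?_drop]
            rw [List.getElem?_eq_getElem (by omega : i + 1 + m' < L.length)]
            simp
            congr 1
            omega
          have hgd1 : L.getD i 'a' = L[i] := List.getD_eq_getElem L 'a' hiL
          have hgd2 : L.getD (i + (m' + 1)) 'a' = L[i + m' + 1] := by
            have := List.getD_eq_getElem L 'a' himL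
            simpa [Nat.add_assoc] using this
          rw [hwin, hw, pvHash_cons, hwlen, hw2, pvHash_snoc, hgd1, hgd2]
          push_cast
          ring
        rw [ih (i + 1) last _ out (by omega) (by omega) (by omega) hhash]
        have hpre : old.isPrefixOf (L.drop i) = false := by
          rw [isPrefixOf_eq_take old _ hmlen, beq_eq_false_iff_ne, ← hm]
          exact fun he => hmatch he
        have hstep : PySem.Chars.replace.go old new (L.drop i).length (L.drop i) []
            = L[i] :: PySem.Chars.replace.go old new (L.drop (i + 1)).length (L.drop (i + 1)) [] := by
          conv_lhs => rw [hcons]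
          rw [hcons] at hpre
          simp only [List.length_cons]
          rw [PySem.Chars.replace.go, if_neg (by rw [hpre]; exact Bool.false_ne_true),
              replace_go_acc old new (L.drop (i + 1)).length (L.drop (i + 1)) (L[i] :: [])]
          simp
        have htake : List.take (i + 1 - last) (L.drop last)
            = List.take (i - last) (L.drop last) ++ [L[i]] := by
          have he : i + 1 - last = (i - last) + 1 := by omega
          rw [he, List.take_add_one]
          congr 1
          rw [List.getElem?_drop, List.getElem?_eq_getElem (by omega : last + (i - last) < L.length)]
          simp
          congr 1
          omega
        rw [hstep, htake]
        simp [List.append_assoc]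
    · -- fewer than m characters remain: flush the tail, replace.go copies it
      rw [if_neg hin]
      have hshort : (L.drop i).length < old.length := by
        simp
        omega
      rw [replace_go_short old new (L.drop i) _ [] hshort (le_refl _)]
      have hdd : L.drop i = List.drop (i - last) (L.drop last) := by
        rw [List.drop_drop]
        congr 1
        omega
      simp only [List.reverse_nil, List.nil_append]
      rw [hdd, List.append_assoc, List.take_append_drop]
      simp

-- one pass of A equals one pass of B (non-empty pattern).
theorem rkReplace_eq_replace (s o nw : String) (h : o.toList ≠ []) :
    String.ofList (rkReplace s.toList o.toList nw.toList) = PySem.Str.replace s o nw := by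
  have hm1 : 1 ≤ o.toList.length := by cases ho : o.toList <;> simp_all
  have hemp : o.toList.isEmpty = false := by cases ho : o.toList <;> simp_all
  rw [PySem.Str.replace, PySem.Chars.replace, hemp]
  simp only [Bool.false_eq_true, if_false]
  rw [rkReplace]
  by_cases hgt : o.toList.length > s.toList.length
  · rw [if_pos hgt,
        replace_go_short o.toList nw.toList s.toList s.toList.length [] hgt (le_refl _)]
    simp
  · rw [if_neg hgt,
        rkGo_eq_replace_go s.toList o.toList nw.toList o.toList.length s.toList.length rfl hm1 rfl
          (s.toList.length + 1) 0 0 (pvHash 0 (s.toList.take o.toList.length)) []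
          (by omega) (le_refl 0) (by omega) (fun _ => by rw [List.drop_zero])]
    simp

-- ===== VERDICT (by name: the statement is the Claim_ definition above) =====
theorem normalize_xml_spec : Claim_equal_normalize_xml := by
  intro x _
  unfold Spec_normalize_xml normalize_xml normalize_xml_alt
  simp only [List.foldl]
  rw [rkReplace_eq_replace _ _ _ (by decide),
      rkReplace_eq_replace _ _ _ (by decide),
      rkReplace_eq_replace _ _ _ (by decide),
      rkReplace_eq_replace _ _ _ (by decide),
      rkReplace_eq_replace _ _ _ (by decide),
      rkReplace_eq_replace _ _ _ (by decide)]
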